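-- pv_equiv track=rewrite | github.com/xmos/test_support | lib/python/xcoverage/xcov.py | cal_xcoverage
-- ===== SOURCE A (Python) =====
-- def cal_xcoverage(merged_result):
--     """
--     calculate coverage by merged_result
--
--     Parameters
--     ----------
--     merged_result : dict
--         a dict store the location of source code and line number and result
--
--     Return
--     ------
--     num_hit : int
--         hit count
--     num_src : int
--         source count
--     not_hit : dict
--         a dict store the source code which not being hit
--     not_expected : dict
--         a dict store the source code which not expected to be hit
--
--     """
--     num_src = 0
--     num_hit = 0
--     not_hit = {}
--     not_expected = {}
--     for key, value in merged_result.items():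
--         for line, hitc in value.items():
--             num_src += 1
--             if hitc != "not hit" and hitc != "NE":
--                 num_hit += 1
--             else:
--                 if hitc == "not hit":
--                     if key not in not_hit:
--                         not_hit[key] = []
--                 else:
--                     if key not in not_expected:
--                         not_expected[key] = []
--                 if hitc == "not hit":
--                     not_hit[key].append(line)
--                 else:
--                     not_expected[key].append(line)
--
--     return num_hit, num_src, not_hit, not_expected
-- ===== SOURCE B (Python) =====
-- def cal_xcoverage(merged_result):
--     """Separated passes: count totals first, then collect the unhit / not-expected
--     lines per key with filtered comprehensions (key inserted only when non-empty)."""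
--     num_src = sum(len(value) for value in merged_result.values())
--     num_hit = sum(sum(1 for h in value.values() if h != "not hit" and h != "NE")
--                   for value in merged_result.values())
--     not_hit = {}
--     for key, value in merged_result.items():
--         lines = [line for line, h in value.items() if h == "not hit"]
--         if lines:
--             not_hit[key] = lines
--     not_expected = {}
--     for key, value in merged_result.items():
--         lines = [line for line, h in value.items() if h == "NE"]
--         if lines:
--             not_expected[key] = lines
--     return num_hit, num_src, not_hit, not_expected
-- ===== Notes on version B (the rewrite author's own statement) =====
-- stated objective: simpler
-- what changed: Replaces A's single interleaved loop that threads four pieces of state (with contains-checks and in-place appends into the two dicts) by separated passes: two plain sums for the counters, and two independent per-key filtered comprehensions that insert a key only when its filtered line list is non-empty.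
import Mathlib
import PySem

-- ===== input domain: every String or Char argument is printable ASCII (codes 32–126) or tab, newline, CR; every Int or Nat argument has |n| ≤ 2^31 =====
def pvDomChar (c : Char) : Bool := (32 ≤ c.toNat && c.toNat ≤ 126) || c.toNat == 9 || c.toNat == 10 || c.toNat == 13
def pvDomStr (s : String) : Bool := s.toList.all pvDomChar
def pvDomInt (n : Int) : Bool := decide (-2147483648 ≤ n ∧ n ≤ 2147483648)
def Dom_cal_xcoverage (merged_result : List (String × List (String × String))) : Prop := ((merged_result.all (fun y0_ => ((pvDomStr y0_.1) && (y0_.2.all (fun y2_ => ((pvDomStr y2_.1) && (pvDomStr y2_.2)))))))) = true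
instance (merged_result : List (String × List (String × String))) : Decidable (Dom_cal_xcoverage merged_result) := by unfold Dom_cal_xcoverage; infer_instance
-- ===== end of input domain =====

-- B separates A's single interleaved stateful loop into independent passes: two sums for
-- the counters and two per-key filtered collections ("simpler" objective, same O(n) cost).

-- ===== PORT A =====
-- one iteration of A's inner `for line, hitc in value.items()` body, over the state
-- (num_src, num_hit, not_hit, not_expected)
def calStep (key : String)
    (st : Int × Int × PySem.Dict String (List String) × PySem.Dict String (List String))
    (p : String × String) :
    Int × Int × PySem.Dict String (List String) × PySem.Dict String (List String) :=
  let ns := st.1 + 1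
  let nh := st.2.1
  let nhit := st.2.2.1
  let ne := st.2.2.2
  if p.2 ≠ "not hit" ∧ p.2 ≠ "NE" then
    (ns, nh + 1, nhit, ne)
  else
    if p.2 = "not hit" then
      let nhit := if nhit.contains key = false then nhit.insert key ([] : List String) else nhit
      (ns, nh, nhit.modify key [] (· ++ [p.1]), ne)   -- not_hit[key].append(line)
    else
      let ne := if ne.contains key = false then ne.insert key ([] : List String) else ne
      (ns, nh, nhit, ne.modify key [] (· ++ [p.1]))   -- not_expected[key].append(line)

def cal_xcoverage (merged_result : List (String × List (String × String))) : Int × Int × (List (String × List String)) × (List (String × List String)) :=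
  let r := merged_result.foldl (fun st kv => kv.2.foldl (calStep kv.1) st)
    ((0 : Int), (0 : Int), (PySem.Dict.empty : PySem.Dict String (List String)),
      (PySem.Dict.empty : PySem.Dict String (List String)))
  (r.2.1, r.1, r.2.2.1.items, r.2.2.2.items)

-- ===== PORT B =====
-- B's collection pass for one tag: insert key only when the filtered line list is non-empty
def collectTag (tag : String) (merged_result : List (String × List (String × String))) :
    PySem.Dict String (List String) :=
  merged_result.foldl (fun d kv =>
    let lines := (kv.2.filter (fun p => p.2 == tag)).map (·.1)
    if lines = [] then d else d.insert kv.1 lines) PySem.Dict.empty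

def cal_xcoverage_alt (merged_result : List (String × List (String × String))) : Int × Int × (List (String × List String)) × (List (String × List String)) :=
  let num_src : Int := merged_result.foldl (fun s kv => s + (kv.2.length : Int)) 0
  let num_hit : Int := merged_result.foldl
    (fun s kv => s + ((kv.2.countP (fun p => !(p.2 == "not hit") && !(p.2 == "NE"))) : Int)) 0
  (num_hit, num_src, (collectTag "not hit" merged_result).items, (collectTag "NE" merged_result).items)

-- ===== PRECONDITION & SPEC =====
-- Pre_ excludes association lists with duplicate outer keys or duplicate inner line keys:
-- such lists do not represent a Python dict (dict construction collapses the duplicates),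
-- so no behaviour of A is specified on them.
def Pre_cal_xcoverage (merged_result : List (String × List (String × String))) : Prop :=
  (merged_result.map (·.1)).Nodup ∧ ∀ p ∈ merged_result, (p.2.map (·.1)).Nodup
instance (merged_result : List (String × List (String × String))) : Decidable (Pre_cal_xcoverage merged_result) := by unfold Pre_cal_xcoverage; infer_instance

def pvWitness_cal_xcoverage : (List (String × List (String × String))) :=
  [("src/f.c", [("3", "hit"), ("4", "not hit"), ("7", "NE")]), ("src/g.c", [("1", "2")])]

def Spec_cal_xcoverage (merged_result : List (String × List (String × String))) (out : Int × Int × (List (String × List String)) × (List (String × List String))) : Prop := out = cal_xcoverage_alt merged_result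
instance (merged_result : List (String × List (String × String))) (out : Int × Int × (List (String × List String)) × (List (String × List String))) : Decidable (Spec_cal_xcoverage merged_result out) := by unfold Spec_cal_xcoverage; infer_instance

-- ===== CLAIM (what is proved, stated in full; the proofs are below) =====
def Claim_equal_cal_xcoverage : Prop := ∀ (merged_result : List (String × List (String × String))), Dom_cal_xcoverage merged_result → Pre_cal_xcoverage merged_result → Spec_cal_xcoverage merged_result (cal_xcoverage merged_result)

-- ===== LEMMAS AND PROOFS =====

-- the "not hit" / "NE" line lists of one inner dict
def nhLines (tag : String) (value : List (String × String)) : List String :=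
  (value.filter (fun p => p.2 == tag)).map (·.1)

-- pushing a whole list of lines for one key at once (what A's inner loop does to one dict)
def dpush (d : PySem.Dict String (List String)) (key : String) (ls : List String) :
    PySem.Dict String (List String) :=
  if ls = [] then d else d.insert key (d.getD key [] ++ ls)

-- A's "ensure key then append" equals a single insert of the extended list
lemma step_push (d : PySem.Dict String (List String)) (key l : String) :
    ((if d.contains key = false then d.insert key ([] : List String) else d).modify key []
      (· ++ [l])) = d.insert key (d.getD key [] ++ [l]) := by
  by_cases h : d.contains key = false
  · simp [h, PySem.Dict.modify, PySem.Dict.getD_insert_self, PySem.Dict.insert_insert_self,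
      PySem.Dict.getD_of_not_contains d _ h]
  · simp [h, PySem.Dict.modify]

lemma dpush_cons (d : PySem.Dict String (List String)) (key l : String) (ls : List String) :
    dpush (d.insert key (d.getD key [] ++ [l])) key ls = dpush d key (l :: ls) := by
  cases ls with
  | nil => simp [dpush]
  | cons x xs =>
      simp [dpush, PySem.Dict.getD_insert_self, PySem.Dict.insert_insert_self]

-- A's inner loop over one value, from an arbitrary state
lemma inner_loop (key : String) (value : List (String × String)) :
    ∀ (ns nh : Int) (nhit ne : PySem.Dict String (List String)),
    value.foldl (calStep key) (ns, nh, nhit, ne) =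
      (ns + value.length,
       nh + (value.countP (fun p => !(p.2 == "not hit") && !(p.2 == "NE")) : Int),
       dpush nhit key (nhLines "not hit" value),
       dpush ne key (nhLines "NE" value)) := by
  induction value with
  | nil => intro ns nh nhit ne; simp [dpush, nhLines]
  | cons p rest ih =>
      intro ns nh nhit ne
      simp only [List.foldl_cons]
      by_cases h1 : p.2 = "not hit"
      · have hstep : calStep key (ns, nh, nhit, ne) p =
            (ns + 1, nh, nhit.insert key (nhit.getD key [] ++ [p.1]), ne) := by
          simp only [calStep, h1]
          rw [if_neg (by simp), if_pos trivial, step_push]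
        rw [hstep, ih, dpush_cons]
        simp [nhLines, h1]
        omega
      · by_cases h2 : p.2 = "NE"
        · have hstep : calStep key (ns, nh, nhit, ne) p =
              (ns + 1, nh, nhit, ne.insert key (ne.getD key [] ++ [p.1])) := by
            simp only [calStep, h2]
            rw [if_neg (by simp), if_neg (by simp), step_push]
          rw [hstep, ih, dpush_cons]
          simp [nhLines, h2]
          omega
        · have hstep : calStep key (ns, nh, nhit, ne) p = (ns + 1, nh + 1, nhit, ne) := by
            simp only [calStep]
            rw [if_pos ⟨h1, h2⟩]
          rw [hstep, ih]
          simp [nhLines, h1, h2]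
          omega

-- on a fresh key, dpush is exactly B's conditional insert
lemma dpush_fresh (d : PySem.Dict String (List String)) (key : String) (ls : List String)
    (h : d.contains key = false) :
    dpush d key ls = if ls = [] then d else d.insert key ls := by
  simp [dpush, PySem.Dict.getD_of_not_contains d _ h]

-- freshness is preserved for the other keys
lemma contains_dpush (d : PySem.Dict String (List String)) (key k : String) (ls : List String)
    (hk : k ≠ key) (h : d.contains k = false) : (dpush d key ls).contains k = false := by
  unfold dpush
  split
  · exact h
  · simp [PySem.Dict.contains_insert, hk, h]

-- A's outer loop from states whose dicts are fresh for all remaining keys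
lemma outer_loop (mr : List (String × List (String × String))) :
    ∀ (ns nh : Int) (nhit ne : PySem.Dict String (List String)),
    (mr.map (·.1)).Nodup →
    (∀ k ∈ mr.map (·.1), nhit.contains k = false) →
    (∀ k ∈ mr.map (·.1), ne.contains k = false) →
    mr.foldl (fun st kv => kv.2.foldl (calStep kv.1) st) (ns, nh, nhit, ne) =
      (ns + mr.foldl (fun s kv => s + (kv.2.length : Int)) 0,
       nh + mr.foldl (fun s kv =>
          s + ((kv.2.countP (fun p => !(p.2 == "not hit") && !(p.2 == "NE"))) : Int)) 0,
       mr.foldl (fun d kv =>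
          let lines := (kv.2.filter (fun p => p.2 == "not hit")).map (·.1)
          if lines = [] then d else d.insert kv.1 lines) nhit,
       mr.foldl (fun d kv =>
          let lines := (kv.2.filter (fun p => p.2 == "NE")).map (·.1)
          if lines = [] then d else d.insert kv.1 lines) ne) := by
  induction mr with
  | nil => intro ns nh nhit ne _ _ _; simp
  | cons kv rest ih =>
      intro ns nh nhit ne hnd hf1 hf2
      have hkey1 : nhit.contains kv.1 = false := hf1 kv.1 (by simp)
      have hkey2 : ne.contains kv.1 = false := hf2 kv.1 (by simp)
      rw [List.map_cons] at hnd
      have hnotin : kv.1 ∉ rest.map (·.1) := (List.nodup_cons.mp hnd).1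
      have hnd' : (rest.map (·.1)).Nodup := (List.nodup_cons.mp hnd).2
      simp only [List.foldl_cons]
      rw [inner_loop]
      rw [ih _ _ _ _ hnd'
        (fun k hk => contains_dpush _ _ _ _ (fun h => hnotin (by rw [← h]; exact hk)) (hf1 k (by simp [hk])))
        (fun k hk => contains_dpush _ _ _ _ (fun h => hnotin (by rw [← h]; exact hk)) (hf2 k (by simp [hk])))]
      rw [dpush_fresh _ _ _ hkey1, dpush_fresh _ _ _ hkey2]
      simp only [PySem.List.foldl_add, nhLines, Prod.mk.injEq]
      exact ⟨by ring, by ring, trivial⟩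

-- ===== VERDICT (by name: the statement is the Claim_ definition above) =====
theorem cal_xcoverage_spec : Claim_equal_cal_xcoverage := by
  intro mr _ hpre
  unfold Spec_cal_xcoverage cal_xcoverage cal_xcoverage_alt collectTag
  rw [outer_loop mr 0 0 _ _ hpre.1
    (fun k _ => PySem.Dict.contains_empty k) (fun k _ => PySem.Dict.contains_empty k)]
  simp
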